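-- pv_equiv track=rewrite | github.com/1xiaosongz/lll | 5860.py | group_and_count_2d_arrays
-- ===== SOURCE A (Python) =====
-- def group_and_count_2d_arrays(pairs):
--     # 初始化结果字典
--     total_counts = {
--         "小于50": 0,
--         "50-100": 0,
--         "100-150": 0,
--         "150-200": 0,
--         "大于200": 0
--     }
--     grouped_x_values = {
--         "小于50": [],
--         "50-100": [],
--         "100-150": [],
--         "150-200": [],
--         "大于200": []
--     }
--     # 遍历所有元组
--     for pair in pairs:
--         x, y = pair
--         diff = abs(x - y)
--
--         # 确定所属区间
--         if diff < 50:
--             total_counts["小于50"] += 1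
--             grouped_x_values["小于50"].append(y)
--         elif 50 <= diff < 100:
--             total_counts["50-100"] += 1
--             grouped_x_values["50-100"].append(y)
--         elif 100 <= diff < 150:
--             total_counts["100-150"] += 1
--             grouped_x_values["100-150"].append(y)
--         elif 150 <= diff < 200:
--             total_counts["150-200"] += 1
--             grouped_x_values["150-200"].append(y)
--         else:  # diff >= 200
--             total_counts["大于200"] += 1
--             grouped_x_values["大于200"].append(y)
--
--     return total_counts, grouped_x_values
-- ===== SOURCE B (Python) =====
-- _KEYS = ["小于50", "50-100", "100-150", "150-200", "大于200"]
--
--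
-- def _bucket(x, y):
--     return min(abs(x - y) // 50, 4)
--
--
-- def group_and_count_2d_arrays(pairs):
--     total_counts = {}
--     grouped_x_values = {}
--     for i, k in enumerate(_KEYS):
--         ys = [y for x, y in pairs if _bucket(x, y) == i]
--         total_counts[k] = len(ys)
--         grouped_x_values[k] = ys
--     return total_counts, grouped_x_values
-- ===== Notes on version B (the rewrite author's own statement) =====
-- stated objective: idiomatic
-- what changed: Replaces A's five-way if/elif comparison cascade that mutates pre-initialized dicts inside one loop with a per-bucket pass: for each of the five keys, compute the bucket index arithmetically (min(abs(x-y)//50, 4)) and build that bucket's list as a comprehension, its count as len().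
import Mathlib
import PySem

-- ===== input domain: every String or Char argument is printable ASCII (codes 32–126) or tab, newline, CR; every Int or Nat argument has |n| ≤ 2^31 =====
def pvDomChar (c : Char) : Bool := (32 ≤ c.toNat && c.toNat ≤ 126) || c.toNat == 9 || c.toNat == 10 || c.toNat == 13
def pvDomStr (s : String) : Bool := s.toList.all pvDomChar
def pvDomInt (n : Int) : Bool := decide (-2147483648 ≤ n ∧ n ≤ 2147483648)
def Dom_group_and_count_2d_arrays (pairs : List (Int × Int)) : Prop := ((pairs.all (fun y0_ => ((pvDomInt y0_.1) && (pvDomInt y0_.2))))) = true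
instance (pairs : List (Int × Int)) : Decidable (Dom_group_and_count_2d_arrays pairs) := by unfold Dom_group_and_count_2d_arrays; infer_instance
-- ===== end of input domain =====

-- B replaces A's five-way if/elif cascade with one pass per bucket: ys = filter on the
-- arithmetic bucket index min(|x-y|//50, 4), counts = len(ys) (objective: idiomatic, same cost).

-- ===== PORT A =====
-- one iteration of A's loop body: branch cascade on diff, updating both dicts in place
def pvStepA (st : PySem.Dict String Int × PySem.Dict String (List Int)) :
    Int × Int → PySem.Dict String Int × PySem.Dict String (List Int)
  | (x, y) =>
    if |x - y| < 50 then
      (st.1.modify "小于50" 0 (· + 1), st.2.modify "小于50" [] (· ++ [y]))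
    else if 50 ≤ |x - y| ∧ |x - y| < 100 then
      (st.1.modify "50-100" 0 (· + 1), st.2.modify "50-100" [] (· ++ [y]))
    else if 100 ≤ |x - y| ∧ |x - y| < 150 then
      (st.1.modify "100-150" 0 (· + 1), st.2.modify "100-150" [] (· ++ [y]))
    else if 150 ≤ |x - y| ∧ |x - y| < 200 then
      (st.1.modify "150-200" 0 (· + 1), st.2.modify "150-200" [] (· ++ [y]))
    else
      (st.1.modify "大于200" 0 (· + 1), st.2.modify "大于200" [] (· ++ [y]))

def group_and_count_2d_arrays (pairs : List (Int × Int)) : (List (String × Int)) × (List (String × List Int)) :=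
  let r := pairs.foldl pvStepA
    (PySem.Dict.mk [("小于50", (0 : Int)), ("50-100", 0), ("100-150", 0), ("150-200", 0), ("大于200", 0)],
     PySem.Dict.mk [("小于50", ([] : List Int)), ("50-100", []), ("100-150", []), ("150-200", []), ("大于200", [])])
  (r.1.items, r.2.items)

-- ===== PORT B =====
def pvKeys : List String := ["小于50", "50-100", "100-150", "150-200", "大于200"]

def pvBucket (x y : Int) : Int := min (PySem.Int.floordiv |x - y| 50) 4

def group_and_count_2d_arrays_alt (pairs : List (Int × Int)) : (List (String × Int)) × (List (String × List Int)) :=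
  let r := (PySem.List.enumerate pvKeys 0).foldl
    (fun (st : PySem.Dict String Int × PySem.Dict String (List Int)) ik =>
      let ys := (pairs.filter (fun p => pvBucket p.1 p.2 == ik.1)).map (fun p => p.2)
      (st.1.insert ik.2 (ys.length : Int), st.2.insert ik.2 ys))
    (PySem.Dict.empty, PySem.Dict.empty)
  (r.1.items, r.2.items)

-- ===== PRECONDITION & SPEC =====
def Spec_group_and_count_2d_arrays (pairs : List (Int × Int)) (out : (List (String × Int)) × (List (String × List Int))) : Prop := out = group_and_count_2d_arrays_alt pairs
instance (pairs : List (Int × Int)) (out : (List (String × Int)) × (List (String × List Int))) : Decidable (Spec_group_and_count_2d_arrays pairs out) := by unfold Spec_group_and_count_2d_arrays; infer_instance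

-- ===== CLAIM (what is proved, stated in full; the proofs are below) =====
def Claim_equal_group_and_count_2d_arrays : Prop := ∀ (pairs : List (Int × Int)), Dom_group_and_count_2d_arrays pairs → Spec_group_and_count_2d_arrays pairs (group_and_count_2d_arrays pairs)

-- ===== LEMMAS AND PROOFS =====
-- B's per-bucket list for index i
def pvYs (i : Int) (pairs : List (Int × Int)) : List Int :=
  (pairs.filter (fun p => pvBucket p.1 p.2 == i)).map (fun p => p.2)

lemma pvBucket0 (x y : Int) (h : |x - y| < 50) : pvBucket x y = 0 := by
  have ha : 0 ≤ |x - y| := abs_nonneg _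
  unfold pvBucket; rw [PySem.Int.floordiv_eq_ediv_of_pos (by norm_num)]; omega

lemma pvBucket1 (x y : Int) (h : 50 ≤ |x - y| ∧ |x - y| < 100) : pvBucket x y = 1 := by
  have ha : 0 ≤ |x - y| := abs_nonneg _
  unfold pvBucket; rw [PySem.Int.floordiv_eq_ediv_of_pos (by norm_num)]; omega

lemma pvBucket2 (x y : Int) (h : 100 ≤ |x - y| ∧ |x - y| < 150) : pvBucket x y = 2 := by
  have ha : 0 ≤ |x - y| := abs_nonneg _
  unfold pvBucket; rw [PySem.Int.floordiv_eq_ediv_of_pos (by norm_num)]; omega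

lemma pvBucket3 (x y : Int) (h : 150 ≤ |x - y| ∧ |x - y| < 200) : pvBucket x y = 3 := by
  have ha : 0 ≤ |x - y| := abs_nonneg _
  unfold pvBucket; rw [PySem.Int.floordiv_eq_ediv_of_pos (by norm_num)]; omega

lemma pvBucket4 (x y : Int) (h : 200 ≤ |x - y|) : pvBucket x y = 4 := by
  have ha : 0 ≤ |x - y| := abs_nonneg _
  unfold pvBucket; rw [PySem.Int.floordiv_eq_ediv_of_pos (by norm_num)]; omega

lemma pvYs_cons (i : Int) (x y : Int) (rest : List (Int × Int)) :
    pvYs i ((x, y) :: rest) = if pvBucket x y = i then y :: pvYs i rest else pvYs i rest := by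
  simp [pvYs, List.filter_cons]; split_ifs with h <;> simp_all

lemma pvFoldA (pairs : List (Int × Int)) : ∀ (c0 c1 c2 c3 c4 : Int) (l0 l1 l2 l3 l4 : List Int),
    pairs.foldl pvStepA
      (PySem.Dict.mk [("小于50", c0), ("50-100", c1), ("100-150", c2), ("150-200", c3), ("大于200", c4)],
       PySem.Dict.mk [("小于50", l0), ("50-100", l1), ("100-150", l2), ("150-200", l3), ("大于200", l4)]) =
    (PySem.Dict.mk [("小于50", c0 + (pvYs 0 pairs).length), ("50-100", c1 + (pvYs 1 pairs).length),
        ("100-150", c2 + (pvYs 2 pairs).length), ("150-200", c3 + (pvYs 3 pairs).length),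
        ("大于200", c4 + (pvYs 4 pairs).length)],
     PySem.Dict.mk [("小于50", l0 ++ pvYs 0 pairs), ("50-100", l1 ++ pvYs 1 pairs),
        ("100-150", l2 ++ pvYs 2 pairs), ("150-200", l3 ++ pvYs 3 pairs),
        ("大于200", l4 ++ pvYs 4 pairs)]) := by
  induction pairs with
  | nil => intros; simp [pvYs]
  | cons p rest ih =>
    intro c0 c1 c2 c3 c4 l0 l1 l2 l3 l4
    obtain ⟨x, y⟩ := p
    by_cases h0 : |x - y| < 50
    · have hb := pvBucket0 x y h0
      simp only [List.foldl_cons, pvStepA]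
      rw [if_pos h0]
      simp [PySem.Dict.modify, PySem.Dict.insert, PySem.Dict.getD, PySem.Dict.get?,
        PySem.Dict.contains]
      rw [ih]
      simp [pvYs_cons, hb]
      omega
    · by_cases h1 : 50 ≤ |x - y| ∧ |x - y| < 100
      · have hb := pvBucket1 x y h1
        simp only [List.foldl_cons, pvStepA]
        rw [if_neg h0, if_pos h1]
        simp [PySem.Dict.modify, PySem.Dict.insert, PySem.Dict.getD, PySem.Dict.get?,
          PySem.Dict.contains]
        rw [ih]
        simp [pvYs_cons, hb]
        omega
      · by_cases h2 : 100 ≤ |x - y| ∧ |x - y| < 150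
        · have hb := pvBucket2 x y h2
          simp only [List.foldl_cons, pvStepA]
          rw [if_neg h0, if_neg h1, if_pos h2]
          simp [PySem.Dict.modify, PySem.Dict.insert, PySem.Dict.getD, PySem.Dict.get?,
            PySem.Dict.contains]
          rw [ih]
          simp [pvYs_cons, hb]
          omega
        · by_cases h3 : 150 ≤ |x - y| ∧ |x - y| < 200
          · have hb := pvBucket3 x y h3
            simp only [List.foldl_cons, pvStepA]
            rw [if_neg h0, if_neg h1, if_neg h2, if_pos h3]
            simp [PySem.Dict.modify, PySem.Dict.insert, PySem.Dict.getD, PySem.Dict.get?,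
              PySem.Dict.contains]
            rw [ih]
            simp [pvYs_cons, hb]
            omega
          · have hb := pvBucket4 x y (by omega)
            simp only [List.foldl_cons, pvStepA]
            rw [if_neg h0, if_neg h1, if_neg h2, if_neg h3]
            simp [PySem.Dict.modify, PySem.Dict.insert, PySem.Dict.getD, PySem.Dict.get?,
              PySem.Dict.contains]
            rw [ih]
            simp [pvYs_cons, hb]
            omega

-- ===== VERDICT (by name: the statement is the Claim_ definition above) =====
theorem group_and_count_2d_arrays_spec : Claim_equal_group_and_count_2d_arrays := by
  intro pairs _
  unfold Spec_group_and_count_2d_arrays group_and_count_2d_arrays group_and_count_2d_arrays_alt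
  rw [pvFoldA]
  simp [pvKeys, PySem.List.enumerate, PySem.Dict.insert, PySem.Dict.contains, PySem.Dict.empty,
    pvYs]
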